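-- pv_equiv track=rewrite | github.com/MrBrantCode/unitest_baseline | mut_generate/mist_train_taco/taco_6633/solution.py | find_min_k_dominant_character
-- ===== SOURCE A (Python) =====
-- def find_min_k_dominant_character(s: str) -> int:
--     d = dict()
--
--     # Populate the dictionary with character positions
--     for i in range(len(s)):
--         el = s[i]
--         try:
--             d[el].append(i)
--         except KeyError:
--             d[el] = [-1, i]
--
--     # Append the length of the string to each character's list
--     for i in d.keys():
--         d[i].append(len(s))
--
--     # Calculate the maximum gap for each character
--     a = list()
--     for i in d.keys():
--         t = [d[i][j] - d[i][j - 1] for j in range(1, len(d[i]))]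
--         a.append(max(t))
--
--     # Return the minimum of the maximum gaps or half the length of the string
--     return min(min(a), (len(s) + 2) // 2)
-- ===== SOURCE B (Python) =====
-- def find_min_k_dominant_character(s: str) -> int:
--     st = {}
--     for i, c in enumerate(s):
--         last, mg = st.get(c, (-1, 0))
--         st[c] = (i, max(mg, i - last))
--     n = len(s)
--     best = min(max(mg, n - last) for last, mg in st.values())
--     return min(best, (n + 2) // 2)
-- ===== Notes on version B (the rewrite author's own statement) =====
-- stated objective: simpler
-- what changed: Replaces A's three passes over a dict of full position lists (build positions, append len(s), recompute all adjacent gaps per character) by a single pass keeping only (last index, running max gap) per character, finished by one max per character.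
import Mathlib
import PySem

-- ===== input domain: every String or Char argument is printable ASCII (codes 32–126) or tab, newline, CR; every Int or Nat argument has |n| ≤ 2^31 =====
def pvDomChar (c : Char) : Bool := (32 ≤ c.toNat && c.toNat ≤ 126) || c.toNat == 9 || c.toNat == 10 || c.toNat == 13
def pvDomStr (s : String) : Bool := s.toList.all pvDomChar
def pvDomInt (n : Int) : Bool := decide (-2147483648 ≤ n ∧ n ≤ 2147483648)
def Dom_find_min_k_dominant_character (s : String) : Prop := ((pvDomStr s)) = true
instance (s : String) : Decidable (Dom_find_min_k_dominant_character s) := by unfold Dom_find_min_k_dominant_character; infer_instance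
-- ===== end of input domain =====

-- B replaces A's three dict passes over full position lists by one pass keeping (last index, running max gap) per character; same result, simpler.

-- ===== PORT A =====
-- max(t) for t = [lst[j] - lst[j-1] for j in range(1, len(lst))]; the .getD 0 arm is Python's ValueError on empty t (never hit in A: every list has ≥ 3 elements)
def pvTmaxA (lst : List Int) : Int :=
  (PySem.List.max?
    ((PySem.List.pyRange 1 (PySem.List.len lst) 1).map
      (fun j => PySem.List.pyGetD lst j 0 - PySem.List.pyGetD lst (j - 1) 0))
    (fun y => y)).getD 0

def find_min_k_dominant_character (s : String) : Int :=
  let xs := s.toList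
  let n : Int := PySem.Str.len s
  -- for i in range(len(s)): try d[s[i]].append(i) except KeyError: d[s[i]] = [-1, i]
  let d := (PySem.List.enumerate xs 0).foldl
      (fun d p => d.modify p.2 [-1] (· ++ [p.1])) (PySem.Dict.empty : PySem.Dict Char (List Int))
  -- for i in d.keys(): d[i].append(len(s))
  let d2 := d.keys.foldl (fun d c => d.modify c [] (· ++ [n])) d
  -- for i in d.keys(): a.append(max(t))
  let a := d2.keys.foldl (fun a c => a ++ [pvTmaxA (d2.getD c [])]) ([] : List Int)
  -- min(min(a), (len(s) + 2) // 2); the none arm is Python's ValueError on empty s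
  match PySem.List.min? a (fun y => y) with
  | none => 0
  | some m => min m (PySem.Int.floordiv (n + 2) 2)

-- ===== PORT B =====
def find_min_k_dominant_character_alt (s : String) : Int :=
  let st := (PySem.List.enumerate s.toList 0).foldl
      (fun st p =>
        let q := st.getD p.2 (-1, 0)
        st.insert p.2 (p.1, max q.2 (p.1 - q.1)))
      (PySem.Dict.empty : PySem.Dict Char (Int × Int))
  let n : Int := PySem.Str.len s
  -- min(...) over st.values(); the none arm is Python's ValueError on empty s
  match PySem.List.min? (st.values.map (fun q => max q.2 (n - q.1))) (fun y => y) with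
  | none => 0
  | some m => min m (PySem.Int.floordiv (n + 2) 2)

-- ===== PRECONDITION & SPEC =====
-- Pre_ excludes only the empty string, on which the Python A (and B) raises ValueError (min of an empty sequence).
def Pre_find_min_k_dominant_character (s : String) : Prop := s ≠ ""
instance (s : String) : Decidable (Pre_find_min_k_dominant_character s) := by unfold Pre_find_min_k_dominant_character; infer_instance
def pvWitness_find_min_k_dominant_character : String := "aab"

def Spec_find_min_k_dominant_character (s : String) (out : Int) : Prop := out = find_min_k_dominant_character_alt s
instance (s : String) (out : Int) : Decidable (Spec_find_min_k_dominant_character s out) := by unfold Spec_find_min_k_dominant_character; infer_instance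

-- ===== CLAIM (what is proved, stated in full; the proofs are below) =====
def Claim_equal_find_min_k_dominant_character : Prop := ∀ (s : String), Dom_find_min_k_dominant_character s → Pre_find_min_k_dominant_character s → Spec_find_min_k_dominant_character s (find_min_k_dominant_character s)

-- ===== LEMMAS AND PROOFS =====

-- adjacent gaps of (prev :: l)
def pvGaps (prev : Int) : List Int → List Int
  | [] => []
  | i :: t => (i - prev) :: pvGaps i t

theorem pvAdict (l : List (Int × Char)) (d : PySem.Dict Char (List Int)) (c : Char) :
    (l.foldl (fun d p => d.modify p.2 [-1] (· ++ [p.1])) d).getD c [-1]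
      = d.getD c [-1] ++ ((l.filter (fun p => p.2 == c)).map (·.1)) := by
  induction l generalizing d with
  | nil => simp
  | cons p l ih =>
    simp only [List.foldl_cons, ih, List.filter_cons]
    rw [PySem.Dict.getD_modify]
    by_cases h : c = p.2
    · simp [h]
    · rw [if_neg h, if_neg (show ¬(p.2 == c) = true by simp; exact fun hh => h hh.symm)]

theorem pvBdict (l : List (Int × Char)) (st : PySem.Dict Char (Int × Int)) (c : Char) :
    (l.foldl (fun st p =>
        let q := st.getD p.2 (-1, 0)
        st.insert p.2 (p.1, max q.2 (p.1 - q.1))) st).getD c (-1, 0)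
      = ((l.filter (fun p => p.2 == c)).map (·.1)).foldl
          (fun q i => (i, max q.2 (i - q.1))) (st.getD c (-1, 0)) := by
  induction l generalizing st with
  | nil => simp
  | cons p l ih =>
    simp only [List.foldl_cons, ih, List.filter_cons]
    rw [PySem.Dict.getD_insert]
    by_cases h : c = p.2
    · simp [h]
    · rw [if_neg h, if_neg (show ¬(p.2 == c) = true by simp; exact fun hh => h hh.symm)]

theorem pvGetD_default {ν : Type} (d : PySem.Dict Char ν) (c : Char) (v w : ν)
    (h : c ∈ d.keys) : d.getD c v = d.getD c w := by
  rw [PySem.Dict.getD_eq_get?_getD, PySem.Dict.getD_eq_get?_getD]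
  cases hg : d.get? c with
  | none => exact absurd ((PySem.Dict.get?_eq_none_iff_not_mem_keys _ _).mp hg) (by simp [h])
  | some x => simp

theorem pvAppend_loop (ks : List Char) (d : PySem.Dict Char (List Int)) (c : Char) (n : Int)
    (hnd : ks.Nodup) :
    (ks.foldl (fun d c => d.modify c [] (· ++ [n])) d).getD c []
      = if c ∈ ks then d.getD c [] ++ [n] else d.getD c [] := by
  induction ks generalizing d with
  | nil => simp
  | cons k ks ih =>
    simp only [List.nodup_cons] at hnd
    simp only [List.foldl_cons, ih _ hnd.2]
    by_cases h : c = k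
    · subst h
      simp [hnd.1, PySem.Dict.getD_modify_self]
    · rw [PySem.Dict.getD_modify_of_ne (hne := h)]
      simp [h]

theorem pvRangeGaps (t : List Int) (a : Int) :
    (List.range t.length).map (fun k => (a :: t).getD (k + 1) 0 - (a :: t).getD k 0)
      = pvGaps a t := by
  induction t generalizing a with
  | nil => simp [pvGaps]
  | cons b t ih =>
    rw [List.length_cons, List.range_succ_eq_map]
    simp only [List.map_cons, List.map_map]
    rw [pvGaps]
    congr 1
    rw [← ih b]
    apply List.map_congr_left
    intro k _
    simp

theorem pvTmaxA_eq (a : Int) (t : List Int) :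
    pvTmaxA (a :: t) = (PySem.List.max? (pvGaps a t) (fun y => y)).getD 0 := by
  unfold pvTmaxA
  have hlen : PySem.List.len (a :: t) = ((t.length + 1 : Nat) : Int) := by
    simp [PySem.List.len]
  rw [hlen, PySem.List.pyRange_one]
  have h1 : ((((t.length + 1 : Nat) : Int)) - 1).toNat = t.length := by omega
  rw [h1, List.map_map]
  congr 2
  rw [← pvRangeGaps t a]
  apply List.map_congr_left
  intro k _
  have e1 : (1 : Int) + (k : Int) = ((k + 1 : Nat) : Int) := by push_cast; ring
  have e2 : ((k + 1 : Nat) : Int) - 1 = ((k : Nat) : Int) := by push_cast; ring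
  simp only [Function.comp_apply, e1, e2, PySem.List.pyGetD_natCast]

theorem pvKeyFold (l : List Int) (n : Int) : ∀ (last mg : Int),
    max (l.foldl (fun q i => (i, max q.2 (i - q.1))) (last, mg)).2
        (n - (l.foldl (fun q i => (i, max q.2 (i - q.1))) (last, mg)).1)
      = (pvGaps last (l ++ [n])).foldl max mg := by
  induction l with
  | nil => intro last mg; simp [pvGaps]
  | cons i l ih =>
    intro last mg
    simp only [List.foldl_cons, List.cons_append, pvGaps, ih]

theorem pvPerKey (l : List Int) (n : Int) (hl : ∀ i ∈ l, 0 ≤ i) (hn : 0 ≤ n) :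
    pvTmaxA (-1 :: (l ++ [n]))
      = max ((l.foldl (fun q i => (i, max q.2 (i - q.1))) ((-1 : Int), (0 : Int))).2)
          (n - (l.foldl (fun q i => (i, max q.2 (i - q.1))) ((-1 : Int), (0 : Int))).1) := by
  rw [pvTmaxA_eq, pvKeyFold]
  cases l with
  | nil =>
    simp only [List.nil_append, pvGaps, PySem.List.max?_id_cons, List.foldl_nil, Option.getD_some,
      List.foldl_cons]
    omega
  | cons i l' =>
    have hi : 0 ≤ i := hl i (by simp)
    simp only [List.cons_append, pvGaps, PySem.List.max?_id_cons, Option.getD_some,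
      List.foldl_cons]
    have : max 0 (i - -1) = i - -1 := by omega
    rw [this]

def pvIdx (xs : List Char) (c : Char) : List Int :=
  ((PySem.List.enumerate xs 0).filter (fun p => p.2 == c)).map (·.1)

theorem pvIdxNonneg (xs : List Char) (c : Char) : ∀ i ∈ pvIdx xs c, 0 ≤ i := by
  intro i hi
  unfold pvIdx at hi
  rcases List.mem_map.mp hi with ⟨p, hp, rfl⟩
  rcases (PySem.List.mem_enumerate_iff _ _ _).mp (List.mem_of_mem_filter hp) with ⟨k, hk, rfl⟩
  simp

theorem pvSetUpdateSelf (K : List Char) : PySem.Set.update K K = K := by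
  rw [PySem.Set.update_eq_append_filter]
  have : List.filter (fun y => !PySem.Set.contains K y) (PySem.Set.ofList K) = [] := by
    rw [List.filter_eq_nil_iff]
    intro y hy
    simp only [PySem.Set.mem_ofList] at hy
    simp [hy, PySem.Set.contains_eq_listContains]
  rw [this, List.append_nil]

theorem pvAeq (s : String) :
    find_min_k_dominant_character s
      = (match PySem.List.min?
            ((PySem.Set.ofList s.toList).map
              (fun c => pvTmaxA (-1 :: (pvIdx s.toList c ++ [PySem.Str.len s]))))
            (fun y => y) with
         | none => 0
         | some m => min m (PySem.Int.floordiv (PySem.Str.len s + 2) 2)) := by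
  unfold find_min_k_dominant_character
  simp only []
  have h1 := PySem.Dict.keys_foldl_modify_key (ν := List Int) (PySem.List.enumerate s.toList 0)
      (fun p => p.2) [-1] (fun _ p v => v ++ [p.1]) PySem.Dict.empty
  simp only [PySem.Dict.keys_empty, PySem.Set.update_nil_left, PySem.List.map_snd_enumerate] at h1
  simp only [h1]
  have h2 := PySem.Dict.keys_foldl_modify (ν := List Int) (PySem.Set.ofList s.toList) []
      (fun _ _ v => v ++ [PySem.Str.len s])
      ((PySem.List.enumerate s.toList 0).foldl (fun d p => d.modify p.2 [-1] (· ++ [p.1])) PySem.Dict.empty)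
  simp only [h1, pvSetUpdateSelf] at h2
  simp only [h2, PySem.List.foldl_append_singleton_eq_map, List.nil_append]
  refine congrArg (fun L => (match PySem.List.min? L (fun y => y) with
    | none => (0 : Int)
    | some m => min m (PySem.Int.floordiv (PySem.Str.len s + 2) 2))) ?_
  apply List.map_congr_left
  intro c hc
  have hnd := PySem.Set.nodup_ofList s.toList
  have h3 := pvAppend_loop (PySem.Set.ofList s.toList)
      ((PySem.List.enumerate s.toList 0).foldl (fun d p => d.modify p.2 [-1] (· ++ [p.1])) PySem.Dict.empty)
      c (PySem.Str.len s) hnd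
  rw [if_pos hc] at h3
  rw [h3]
  rw [pvGetD_default _ c [] [-1] (by rw [h1]; exact hc)]
  rw [pvAdict]
  simp only [PySem.Dict.getD_empty]
  rfl



theorem pvBeq (s : String) :
    find_min_k_dominant_character_alt s
      = (match PySem.List.min?
            ((PySem.Set.ofList s.toList).map
              (fun c => max ((pvIdx s.toList c).foldl (fun q i => (i, max q.2 (i - q.1))) ((-1 : Int), (0 : Int))).2
                (PySem.Str.len s - ((pvIdx s.toList c).foldl (fun q i => (i, max q.2 (i - q.1))) ((-1 : Int), (0 : Int))).1)))
            (fun y => y) with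
         | none => 0
         | some m => min m (PySem.Int.floordiv (PySem.Str.len s + 2) 2)) := by
  unfold find_min_k_dominant_character_alt
  simp only []
  have h1 := PySem.Dict.keys_foldl_insert_key (ν := Int × Int) (PySem.List.enumerate s.toList 0)
      (fun p => p.2) (fun st p => (p.1, max (st.getD p.2 (-1, 0)).2 (p.1 - (st.getD p.2 (-1, 0)).1)))
      PySem.Dict.empty
  simp only [PySem.Dict.keys_empty, PySem.Set.update_nil_left, PySem.List.map_snd_enumerate] at h1
  have h2 := PySem.Dict.values_eq_map_keys
      ((PySem.List.enumerate s.toList 0).foldl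
        (fun st p =>
          let q := st.getD p.2 (-1, 0)
          st.insert p.2 (p.1, max q.2 (p.1 - q.1))) PySem.Dict.empty)
      (by rw [h1]; exact PySem.Set.nodup_ofList s.toList) ((-1 : Int), (0 : Int))
  rw [h2, h1, List.map_map]
  refine congrArg (fun L => (match PySem.List.min? L (fun y => y) with
    | none => (0 : Int)
    | some m => min m (PySem.Int.floordiv (PySem.Str.len s + 2) 2))) ?_
  apply List.map_congr_left
  intro c hc
  have h3 := pvBdict (PySem.List.enumerate s.toList 0) PySem.Dict.empty c
  simp only [PySem.Dict.getD_empty] at h3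
  simp only [Function.comp_apply, h3]
  rfl

theorem pvMain (s : String) : find_min_k_dominant_character s = find_min_k_dominant_character_alt s := by
  rw [pvAeq, pvBeq]
  refine congrArg (fun L => (match PySem.List.min? L (fun y => y) with
    | none => (0 : Int)
    | some m => min m (PySem.Int.floordiv (PySem.Str.len s + 2) 2))) ?_
  apply List.map_congr_left
  intro c _
  exact pvPerKey (pvIdx s.toList c) (PySem.Str.len s) (pvIdxNonneg s.toList c)
    (by rw [PySem.Str.len_eq]; exact Int.natCast_nonneg _)

-- ===== VERDICT (by name: the statement is the Claim_ definition above) =====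
theorem find_min_k_dominant_character_spec : Claim_equal_find_min_k_dominant_character := by
  intro s _ _
  unfold Spec_find_min_k_dominant_character
  exact pvMain s
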